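-- pv_equiv track=rewrite | github.com/sid-krish/rhometa | dev_files/old_scripts/pairwise_table_paired_end.py | get_final_ref_pos_list
-- ===== SOURCE A (Python) =====
-- def get_final_ref_pos_list(var_pos, windows_size):
--     final_ref_pos_list = []
--     while var_pos:  # while list not empty
--         start = var_pos.pop(0)
--         for i in var_pos:  # once last item is popped this will stop
--             difference = i - start
--             # this version of the program is limited to looking at positions within reads as such if the distance
--             # between position pairs are beyond read length it won't find anything
--             if difference <= windows_size:
--                 # final_ref_pos_list.append((start, i))
--                 # pysam uses 0-based index. Above line used earlier is wrong.
--                 final_ref_pos_list.append((start - 1, i - 1))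
--
--     return final_ref_pos_list
-- ===== SOURCE B (Python) =====
-- def get_final_ref_pos_list(var_pos, windows_size):
--     # Non-destructive single comprehension over (index, value) pairs; for each
--     # position, its partners are the elements of the slice after it.
--     # NOTE: unlike A, this does NOT empty the caller's var_pos list.
--     return [(start - 1, i - 1)
--             for j, start in enumerate(var_pos)
--             for i in var_pos[j + 1:]
--             if i - start <= windows_size]
-- ===== Notes on version B (the rewrite author's own statement) =====
-- stated objective: idiomatic
-- what changed: Replaces A's destructive while/pop(0) loop with explicit appends by a single pure comprehension over enumerate and slices (B does not mutate var_pos; return value identical).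
import Mathlib
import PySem

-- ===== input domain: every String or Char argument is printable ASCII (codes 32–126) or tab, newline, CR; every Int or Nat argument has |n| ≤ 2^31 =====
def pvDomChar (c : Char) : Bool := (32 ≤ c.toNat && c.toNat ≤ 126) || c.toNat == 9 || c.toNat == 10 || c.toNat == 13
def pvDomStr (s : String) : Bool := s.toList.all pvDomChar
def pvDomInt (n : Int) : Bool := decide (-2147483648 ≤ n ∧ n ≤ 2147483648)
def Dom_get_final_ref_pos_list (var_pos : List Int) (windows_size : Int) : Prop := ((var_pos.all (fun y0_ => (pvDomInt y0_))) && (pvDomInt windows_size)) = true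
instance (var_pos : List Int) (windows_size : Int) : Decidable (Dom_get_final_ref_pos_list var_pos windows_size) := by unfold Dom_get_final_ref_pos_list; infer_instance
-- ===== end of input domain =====

-- B is a non-destructive comprehension equal in return value to A's destructive
-- while/pop(0) loop (A empties the caller's list; the equivalence here is about
-- the return value only).
-- ===== PORT A =====
-- 'while var_pos: start = var_pos.pop(0); for i in var_pos: if i-start<=w: append (start-1,i-1)'
def pvLoopA (windows_size : Int) : List Int → List (Int × Int) → List (Int × Int)
  | [], acc => acc
  | start :: rest, acc =>
      pvLoopA windows_size rest
        (rest.foldl (fun a i =>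
          if i - start ≤ windows_size then a ++ [(start - 1, i - 1)] else a) acc)

def get_final_ref_pos_list (var_pos : List Int) (windows_size : Int) : List (Int × Int) :=
  pvLoopA windows_size var_pos []

-- ===== PORT B =====
-- '[(start-1, i-1) for j, start in enumerate(var_pos) for i in var_pos[j+1:] if i-start<=windows_size]'
def get_final_ref_pos_list_alt (var_pos : List Int) (windows_size : Int) : List (Int × Int) :=
  (PySem.List.enumerate var_pos 0).flatMap (fun js =>
    (PySem.List.slice var_pos (some (js.1 + 1)) none).filterMap (fun i =>
      if i - js.2 ≤ windows_size then some (js.2 - 1, i - 1) else none))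

-- ===== PRECONDITION & SPEC =====
def Spec_get_final_ref_pos_list (var_pos : List Int) (windows_size : Int) (out : List (Int × Int)) : Prop := out = get_final_ref_pos_list_alt var_pos windows_size
instance (var_pos : List Int) (windows_size : Int) (out : List (Int × Int)) : Decidable (Spec_get_final_ref_pos_list var_pos windows_size out) := by unfold Spec_get_final_ref_pos_list; infer_instance

-- ===== CLAIM (what is proved, stated in full; the proofs are below) =====
def Claim_equal_get_final_ref_pos_list : Prop := ∀ (var_pos : List Int) (windows_size : Int), Dom_get_final_ref_pos_list var_pos windows_size → Spec_get_final_ref_pos_list var_pos windows_size (get_final_ref_pos_list var_pos windows_size)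

-- ===== LEMMAS AND PROOFS =====

-- closed recursive characterization shared by both ports
def pvRecB (windows_size : Int) : List Int → List (Int × Int)
  | [] => []
  | start :: rest =>
      (rest.filter (fun i => i - start ≤ windows_size)).map (fun i => (start - 1, i - 1))
        ++ pvRecB windows_size rest

theorem pv_filterMap_if {α β : Type} (P : α → Prop) [DecidablePred P] (f : α → β)
    (l : List α) :
    l.filterMap (fun i => if P i then some (f i) else none)
      = (l.filter (fun i => decide (P i))).map f := by
  induction l with
  | nil => rfl
  | cons x t ih =>
    by_cases h : P x <;> simp [h, ih]

theorem pv_foldl_append_if {α β : Type} (P : α → Prop) [DecidablePred P] (f : α → β) :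
    ∀ (l : List α) (acc : List β),
      l.foldl (fun a i => if P i then a ++ [f i] else a) acc
        = acc ++ (l.filter (fun i => decide (P i))).map f := by
  intro l
  induction l with
  | nil => intro acc; simp
  | cons x t ih =>
    intro acc
    by_cases h : P x <;> simp [List.foldl_cons, h, ih]

theorem pv_alt_key (windows_size : Int) :
    ∀ (suf pre : List Int),
      (PySem.List.enumerate suf (pre.length : Int)).flatMap (fun js =>
        (PySem.List.slice (pre ++ suf) (some (js.1 + 1)) none).filterMap (fun i =>
          if i - js.2 ≤ windows_size then some (js.2 - 1, i - 1) else none))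
      = pvRecB windows_size suf := by
  intro suf
  induction suf with
  | nil => intro pre; simp [PySem.List.enumerate_nil, pvRecB]
  | cons x t ih =>
    intro pre
    have h1 : ((pre.length : Int) + 1) = ((pre.length + 1 : Nat) : Int) := by push_cast; ring
    have hslice : PySem.List.slice (pre ++ x :: t) (some ((pre.length : Int) + 1)) none = t := by
      rw [h1, PySem.List.slice_from_natCast]
      rw [show pre ++ x :: t = (pre ++ [x]) ++ t by simp]
      rw [List.drop_append_of_le_length (by simp)]
      simp
    have h2 : PySem.List.enumerate t ((pre.length : Int) + 1)
        = PySem.List.enumerate t (((pre ++ [x]).length : Nat) : Int) := by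
      rw [h1]; congr 1; simp
    have ih' := ih (pre ++ [x])
    simp only [PySem.List.enumerate_cons, List.flatMap_cons]
    rw [hslice, h2, show pre ++ x :: t = (pre ++ [x]) ++ t by simp, ih',
      pv_filterMap_if (fun i => i - x ≤ windows_size) (fun i => (x - 1, i - 1)) t, pvRecB]

theorem pv_loopA_eq (windows_size : Int) :
    ∀ (xs : List Int) (acc : List (Int × Int)),
      pvLoopA windows_size xs acc = acc ++ pvRecB windows_size xs := by
  intro xs
  induction xs with
  | nil => intro acc; simp [pvLoopA, pvRecB]
  | cons x t ih =>
    intro acc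
    rw [pvLoopA,
      pv_foldl_append_if (fun i => i - x ≤ windows_size) (fun i => (x - 1, i - 1)) t acc,
      ih, pvRecB, List.append_assoc]

-- ===== VERDICT (by name: the statement is the Claim_ definition above) =====
theorem get_final_ref_pos_list_spec : Claim_equal_get_final_ref_pos_list := by
  intro var_pos windows_size _
  show get_final_ref_pos_list var_pos windows_size = _
  have hB : get_final_ref_pos_list_alt var_pos windows_size = pvRecB windows_size var_pos := by
    have := pv_alt_key windows_size var_pos []
    simpa [get_final_ref_pos_list_alt] using this
  rw [hB, get_final_ref_pos_list, pv_loopA_eq]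
  simp
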